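-- pv_equiv track=rewrite | github.com/guangzhou/log_analyzer_imp | core/matcher.py | _extract_literal_hint
-- ===== SOURCE A (Python) =====
-- from typing import List, NamedTuple, Optional, Any, Dict, Tuple
--
-- def _extract_literal_hint(pattern: str) -> Optional[str]:
--     """
--     粗略提取模式中长度>=4的连续字面量片段，用于快速过滤候选模板。
--     """
--     literals: List[str] = []
--     buf = []
--     escape = False
--     for ch in pattern:
--         if escape:
--             if ch.isalnum() or ch in "-_:/.":
--                 buf.append(ch)
--             else:
--                 if len(buf) >= 4:
--                     literals.append("".join(buf))
--                 buf = []
--             escape = False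
--             continue
--         if ch == "\\":
--             escape = True
--             continue
--         if ch.isalnum() or ch in "-_:/.":
--             buf.append(ch)
--         else:
--             if len(buf) >= 4:
--                 literals.append("".join(buf))
--             buf = []
--     if len(buf) >= 4:
--         literals.append("".join(buf))
--     if not literals:
--         return None
--     literals.sort(key=len, reverse=True)
--     return literals[0]
-- ===== SOURCE B (Python) =====
-- from typing import Optional
--
--
-- def _extract_literal_hint(pattern: str) -> Optional[str]:
--     # Two phases: first resolve escapes into a normalized text where every
--     # separator becomes a space, then split on spaces and pick the first
--     # longest run of length >= 4.
--     norm = []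
--     i = 0
--     n = len(pattern)
--     while i < n:
--         ch = pattern[i]
--         if ch == "\\":
--             i += 1
--             if i >= n:
--                 break
--             ch = pattern[i]
--         norm.append(ch if (ch.isalnum() or ch in "-_:/.") else " ")
--         i += 1
--     runs = [r for r in "".join(norm).split(" ") if len(r) >= 4]
--     return max(runs, key=len) if runs else None
-- ===== Notes on version B (the rewrite author's own statement) =====
-- stated objective: simpler
-- what changed: B replaces A's stateful escape-flag accumulator loop plus literals list plus stable reverse sort with two plain phases: normalize the pattern (resolve escapes, map every separator char to a space) and then split on spaces and take the first longest run with max(key=len).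
import Mathlib
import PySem

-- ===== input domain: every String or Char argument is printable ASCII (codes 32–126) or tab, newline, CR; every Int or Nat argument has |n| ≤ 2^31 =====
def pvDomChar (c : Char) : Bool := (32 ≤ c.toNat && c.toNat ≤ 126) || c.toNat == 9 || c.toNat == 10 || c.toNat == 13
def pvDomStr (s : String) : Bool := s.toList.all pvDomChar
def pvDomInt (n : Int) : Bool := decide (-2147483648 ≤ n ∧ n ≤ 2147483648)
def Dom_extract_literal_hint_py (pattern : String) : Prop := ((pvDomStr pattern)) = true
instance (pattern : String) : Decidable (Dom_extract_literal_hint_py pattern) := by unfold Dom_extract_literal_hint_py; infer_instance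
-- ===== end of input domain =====

-- B normalizes escapes/separators in one pass and then takes the first longest space-separated run,
-- instead of A's escape-flag accumulator loop that collects a literals list and stably reverse-sorts it.

-- ===== PORT A =====
-- ch.isalnum() or ch in "-_:/."  (this expression appears verbatim in both Python sources)
def pvIsLit (ch : Char) : Bool :=
  PySem.Chars.isalnum ch || PySem.Chars.isIn [ch] ['-', '_', ':', '/', '.']

-- the for-loop of A, state = (literals, buf, escape)
def pvALoop : List Char → List (List Char) × List Char × Bool → List (List Char) × List Char × Bool
  | [], st => st
  | ch :: rest, (lits, buf, esc) =>
    if esc then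
      if pvIsLit ch then pvALoop rest (lits, buf ++ [ch], false)
      else pvALoop rest ((if 4 ≤ buf.length then lits ++ [buf] else lits), [], false)
    else if ch = '\\' then pvALoop rest (lits, buf, true)
    else if pvIsLit ch then pvALoop rest (lits, buf ++ [ch], esc)
    else pvALoop rest ((if 4 ≤ buf.length then lits ++ [buf] else lits), [], esc)

def extract_literal_hint_py (pattern : String) : Option String :=
  let st := pvALoop pattern.toList ([], [], false)
  let lits := if 4 ≤ st.2.1.length then st.1 ++ [st.2.1] else st.1
  if lits = [] then none
  else (PySem.List.pyGet? (PySem.List.sorted lits (fun l => l.length) true) 0).map String.ofList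

-- ===== PORT B =====
-- phase 1 of B: the while-loop resolving escapes; every separator char becomes ' '
def pvBNorm : List Char → List Char
  | [] => []
  | ch :: rest =>
    if ch = '\\' then
      match rest with
      | [] => []
      | ch' :: rest' => (if pvIsLit ch' then ch' else ' ') :: pvBNorm rest'
    else (if pvIsLit ch then ch else ' ') :: pvBNorm rest

def extract_literal_hint_py_alt (pattern : String) : Option String :=
  let runs := (PySem.Chars.splitOn (pvBNorm pattern.toList) [' ']).filter (fun r => 4 ≤ r.length)
  (PySem.List.max? runs (fun r => r.length)).map String.ofList

-- ===== PRECONDITION & SPEC =====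
def Spec_extract_literal_hint_py (pattern : String) (out : Option String) : Prop := out = extract_literal_hint_py_alt pattern
instance (pattern : String) (out : Option String) : Decidable (Spec_extract_literal_hint_py pattern out) := by unfold Spec_extract_literal_hint_py; infer_instance

-- ===== CLAIM (what is proved, stated in full; the proofs are below) =====
def Claim_equal_extract_literal_hint_py : Prop := ∀ (pattern : String), Dom_extract_literal_hint_py pattern → Spec_extract_literal_hint_py pattern (extract_literal_hint_py pattern)

-- ===== LEMMAS AND PROOFS =====

-- natural structural splitter on ' ' (proof-side model of PySem.Chars.splitOn _ [' '])
def pvSplit : List Char → List (List Char)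
  | [] => [[]]
  | a :: r => if a = ' ' then [] :: pvSplit r else (pvSplit r).modifyHead (a :: ·)

theorem pvSplit_ne_nil (l : List Char) : pvSplit l ≠ [] := by
  induction l with
  | nil => simp [pvSplit]
  | cons a r ih =>
    simp only [pvSplit]
    split
    · simp
    · simpa using ih

theorem splitOn_go_eq : ∀ (fuel : Nat) (l cur : List Char) (accs : List (List Char)),
    l.length ≤ fuel →
    PySem.Chars.splitOn.go [' '] fuel l cur accs
      = accs.reverse ++ (pvSplit l).modifyHead (cur.reverse ++ ·) := by
  intro fuel
  induction fuel with
  | zero =>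
    intro l cur accs h
    have : l = [] := List.length_eq_zero_iff.mp (Nat.le_zero.mp h)
    subst this
    simp [PySem.Chars.splitOn.go, pvSplit]
  | succ f ih =>
    intro l cur accs h
    cases l with
    | nil => simp [PySem.Chars.splitOn.go, pvSplit]
    | cons c rest =>
      obtain ⟨h0, t0, hEq⟩ : ∃ h0 t0, pvSplit rest = h0 :: t0 := by
        cases hps : pvSplit rest with
        | nil => exact absurd hps (pvSplit_ne_nil rest)
        | cons a b => exact ⟨a, b, rfl⟩
      have hrest : rest.length ≤ f := by simpa using h
      by_cases hc : c = ' '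
      · subst hc
        rw [PySem.Chars.splitOn.go]
        rw [if_pos (by simp [List.isPrefixOf])]
        simp only [List.length_cons, List.drop_succ_cons, List.length_nil, List.drop_zero]
        rw [ih rest [] (cur.reverse :: accs) hrest]
        simp [pvSplit, hEq]
      · rw [PySem.Chars.splitOn.go]
        rw [if_neg (by simp [List.isPrefixOf]; exact fun h' => hc h'.symm)]
        rw [ih rest (c :: cur) accs hrest]
        simp [pvSplit, hc, hEq]

theorem splitOn_eq_pvSplit (l : List Char) : PySem.Chars.splitOn l [' '] = pvSplit l := by
  rw [PySem.Chars.splitOn]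
  rw [splitOn_go_eq (l.length + 1) l [] [] (by omega)]
  obtain ⟨h0, t0, hEq⟩ : ∃ h0 t0, pvSplit l = h0 :: t0 := by
    cases hps : pvSplit l with
    | nil => exact absurd hps (pvSplit_ne_nil l)
    | cons a b => exact ⟨a, b, rfl⟩
  simp [hEq]

theorem pvSplit_no_sep (xs : List Char) (h : ' ' ∉ xs) : pvSplit xs = [xs] := by
  induction xs with
  | nil => rfl
  | cons a r ih =>
    simp only [List.mem_cons, not_or] at h
    simp [pvSplit, Ne.symm h.1, ih h.2]

theorem pvSplit_append_sep (xs ys : List Char) (h : ' ' ∉ xs) :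
    pvSplit (xs ++ ' ' :: ys) = xs :: pvSplit ys := by
  induction xs with
  | nil => simp [pvSplit]
  | cons a r ih =>
    simp only [List.mem_cons, not_or] at h
    simp [pvSplit, Ne.symm h.1, ih h.2]

-- pvBNorm with a pending escape flag (models A's `escape` state on B's side)
def pvBNormE : Bool → List Char → List Char
  | false, cs => pvBNorm cs
  | true, [] => []
  | true, c :: r => (if pvIsLit c then c else ' ') :: pvBNorm r

theorem pvBNorm_backslash (r : List Char) : pvBNorm ('\\' :: r) = pvBNormE true r := by
  cases r <;> rfl

theorem pvIsLit_ne_space {c : Char} (h : pvIsLit c = true) : c ≠ ' ' := by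
  intro he; subst he; exact absurd h (by decide)

theorem main_lemma : ∀ (cs : List Char) (lits : List (List Char)) (buf : List Char) (esc : Bool),
    ' ' ∉ buf →
    (let st := pvALoop cs (lits, buf, esc);
     if 4 ≤ st.2.1.length then st.1 ++ [st.2.1] else st.1)
    = lits ++ (pvSplit (buf ++ pvBNormE esc cs)).filter (fun r => 4 ≤ r.length) := by
  intro cs
  induction cs with
  | nil =>
    intro lits buf esc hbuf
    cases esc <;>
      simp only [pvALoop, pvBNormE, pvBNorm, List.append_nil, pvSplit_no_sep buf hbuf] <;>
      by_cases h4 : 4 ≤ buf.length <;>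
      simp [h4]
  | cons c rest ih =>
    intro lits buf esc hbuf
    cases esc with
    | true =>
      by_cases hl : pvIsLit c = true
      · have hnb : ' ' ∉ buf ++ [c] := by
          simp [hbuf, Ne.symm (pvIsLit_ne_space hl)]
        have hE : pvBNormE true (c :: rest) = c :: pvBNorm rest := by
          simp [pvBNormE, hl]
        rw [hE]
        have := ih lits (buf ++ [c]) false hnb
        simp only [pvBNormE] at this
        simpa [pvALoop, hl] using this
      · have hE : pvBNormE true (c :: rest) = ' ' :: pvBNorm rest := by
          simp [pvBNormE, hl]
        rw [hE, pvSplit_append_sep buf _ hbuf]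
        have hstep := ih (if 4 ≤ buf.length then lits ++ [buf] else lits) [] false (by simp)
        simp only [pvBNormE, List.nil_append] at hstep
        simp only [pvALoop, hl, Bool.false_eq_true, ite_false, ite_true]
        rw [hstep]
        by_cases h4 : 4 ≤ buf.length <;> simp [h4]
    | false =>
      by_cases hbk : c = '\\'
      · subst hbk
        have hE : pvBNormE false ('\\' :: rest) = pvBNormE true rest := pvBNorm_backslash rest
        rw [hE]
        have := ih lits buf true hbuf
        simpa [pvALoop] using this
      · by_cases hl : pvIsLit c = true
        · have hnb : ' ' ∉ buf ++ [c] := by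
            simp [hbuf, Ne.symm (pvIsLit_ne_space hl)]
          have hE : pvBNormE false (c :: rest) = c :: pvBNorm rest := by
            show pvBNorm (c :: rest) = _
            unfold pvBNorm
            rw [if_neg hbk, if_pos hl]
            congr 1
            exact pvBNorm.eq_def rest
          rw [hE]
          have := ih lits (buf ++ [c]) false hnb
          simp only [pvBNormE] at this
          simpa [pvALoop, hl, hbk] using this
        · have hE : pvBNormE false (c :: rest) = ' ' :: pvBNorm rest := by
            show pvBNorm (c :: rest) = _
            unfold pvBNorm
            rw [if_neg hbk, if_neg hl]
            congr 1
            exact pvBNorm.eq_def rest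
          rw [hE, pvSplit_append_sep buf _ hbuf]
          have hstep := ih (if 4 ≤ buf.length then lits ++ [buf] else lits) [] false (by simp)
          simp only [pvBNormE, List.nil_append] at hstep
          simp only [pvALoop, hl, hbk, Bool.false_eq_true, ite_false]
          rw [hstep]
          by_cases h4 : 4 ≤ buf.length <;> simp [h4]

theorem head?_insertBy {α : Type} (bef : α → α → Bool) (x : α) (acc : List α) :
    (PySem.List.insertBy bef x acc).head?
      = some (match acc with | [] => x | y :: _ => if bef x y then x else y) := by
  cases acc with
  | nil => simp [PySem.List.insertBy]
  | cons y ys =>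
    simp only [PySem.List.insertBy]
    split <;> simp

theorem foldl_insertBy_head? {α : Type} (bef : α → α → Bool) :
    ∀ (xs : List α) (acc : List α),
      (xs.foldl (fun a x => PySem.List.insertBy bef x a) acc).head?
        = xs.foldl (fun m x => match m with
            | none => some x
            | some y => if bef x y then some x else some y) acc.head? := by
  intro xs
  induction xs with
  | nil => intro acc; rfl
  | cons x t ih =>
    intro acc
    simp only [List.foldl_cons]
    rw [ih]
    congr 1
    rw [head?_insertBy]
    cases acc with
    | nil => rfl
    | cons y ys => simp only [List.head?_cons]; split <;> rfl

theorem head?_sorted_rev {α : Type} (L : List α) (key : α → Nat) :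
    (PySem.List.sorted L key true).head? = PySem.List.max? L key := by
  rw [PySem.List.sorted_rev_eq_foldl_insertBy]
  rw [foldl_insertBy_head?]
  unfold PySem.List.max?
  congr 1
  funext m x
  cases m <;> simp

theorem pyGet?_zero {α : Type} (xs : List α) : PySem.List.pyGet? xs 0 = xs.head? := by
  cases xs <;> simp [PySem.List.pyGet?, PySem.List.pyIdx?]

-- ===== VERDICT (by name: the statement is the Claim_ definition above) =====
theorem extract_literal_hint_py_spec : Claim_equal_extract_literal_hint_py := by
  intro pattern _
  unfold Spec_extract_literal_hint_py extract_literal_hint_py extract_literal_hint_py_alt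
  have h := main_lemma pattern.toList [] [] false (by simp)
  simp only [pvBNormE, List.nil_append] at h
  rw [splitOn_eq_pvSplit]
  simp only [h]
  cases hL : (pvSplit (pvBNorm pattern.toList)).filter (fun r => 4 ≤ r.length) with
  | nil => simp [PySem.List.max?]
  | cons a b =>
    rw [if_neg (by simp)]
    rw [pyGet?_zero, head?_sorted_rev]
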